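-- pv_equiv track=rewrite | github.com/ebbunnim/Algorithm | 프로그래머스/21_summer_intern/test2.py | solution
-- ===== SOURCE A (Python) =====
-- import heapq
--
-- def solution(t, r):
--     answer = []
--     heap=[]
--     sort_list = [(v,i) for i,v in enumerate(t)] # lift_id, customer_id
--     sort_list.sort(reverse=True)
--     start_t,finish_t=0,max(t)
--     while start_t!=finish_t+1:
--         while sort_list and sort_list[-1][0]==start_t:
--             lift_id,customer_id=sort_list.pop()
--             heapq.heappush(heap,(r[customer_id],lift_id,customer_id))
--         start_t+=1
--         if heap:
--             _, _, customer_id = heapq.heappop(heap)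
--             answer+=[customer_id]
--     while heap: # for left customers
--         _, _, customer_id = heapq.heappop(heap)
--         answer+=[customer_id]
--     return answer
-- ===== SOURCE B (Python) =====
-- def solution(t, r):
--     n = len(t)
--     unserved = list(range(n))
--     time = 0
--     answer = []
--     while unserved:
--         avail = [i for i in unserved if t[i] <= time]
--         if not avail:
--             time = min(t[i] for i in unserved)
--             avail = [i for i in unserved if t[i] <= time]
--         best = min(avail, key=lambda i: (r[i], t[i], i))
--         answer.append(best)
--         unserved = [i for i in unserved if i != best]
--         time += 1
--     return answer
-- ===== Notes on version B (the rewrite author's own statement) =====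
-- stated objective: alternative
-- what changed: B drops A's per-time-tick simulation with a pre-sorted arrival list and a heap: it runs one selection iteration per customer, jumping idle time straight to the next arrival and picking the (priority, arrival, id)-minimal available customer by a direct scan of the unserved list.
-- outside the precondition, e.g. on solution([-1], [5]): A returns [], B returns [0]; on solution([2, 4, -1], [-2, -1, 7, 10, 6]): A returns [], B returns [2, 0, 1]
import Mathlib
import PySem

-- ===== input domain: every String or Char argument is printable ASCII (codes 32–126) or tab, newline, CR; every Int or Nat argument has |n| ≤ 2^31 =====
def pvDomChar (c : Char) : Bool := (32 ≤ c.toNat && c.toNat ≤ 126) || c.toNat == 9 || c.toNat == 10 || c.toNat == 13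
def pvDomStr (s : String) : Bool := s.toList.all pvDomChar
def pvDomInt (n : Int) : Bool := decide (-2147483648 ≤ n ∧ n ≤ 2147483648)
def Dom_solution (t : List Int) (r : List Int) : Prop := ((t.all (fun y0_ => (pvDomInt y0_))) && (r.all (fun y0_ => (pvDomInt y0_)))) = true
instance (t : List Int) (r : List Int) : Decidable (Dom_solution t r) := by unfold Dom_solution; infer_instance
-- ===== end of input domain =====

-- B replaces A's tick-by-tick heap simulation by one selection scan per customer with idle-time
-- jumps (objective: alternative; equivalence of the RETURN value on the stated precondition).

-- Python's `<` on int-triples (lexicographic); used by A's heap order and by B's min key.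
def lt3 (a b : Int × Int × Int) : Bool :=
  decide (a.1 < b.1) ||
    (a.1 == b.1 && (decide (a.2.1 < b.2.1) || (a.2.1 == b.2.1 && decide (a.2.2 < b.2.2))))

-- ===== PORT A =====
-- heapq is modelled by its heap CONTENTS: heappush adds the element, heappop removes the smallest.
-- This is exact here because every triple pushed in one run has a distinct customer id (third
-- component), so "the smallest element" is determined by the contents alone.
def heapMin? (h : List (Int × Int × Int)) : Option (Int × Int × Int) :=
  match h with
  | [] => none
  | x :: xs => some (xs.foldl (fun m y => if lt3 y m then y else m) x)

def heapPop (h : List (Int × Int × Int)) : Option ((Int × Int × Int) × List (Int × Int × Int)) :=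
  (heapMin? h).map (fun m => (m, h.erase m))

-- inner `while sort_list and sort_list[-1][0]==start_t:` (pop from the back, heappush)
def pushLoopA (r : List Int) (s : Int) (sl : List (Int × Int)) (heap : List (Int × Int × Int)) :
    List (Int × Int) × List (Int × Int × Int) :=
  match hl : sl.getLast? with
  | none => (sl, heap)
  | some (v, i) =>
    if v = s then
      pushLoopA r s sl.dropLast ((PySem.List.pyGetD r i 0, v, i) :: heap)
    else (sl, heap)
termination_by sl.length
decreasing_by
  have hne : sl ≠ [] := by intro h; subst h; simp at hl
  have hpos : 0 < sl.length := List.length_pos_of_ne_nil hne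
  simp [List.length_dropLast]; omega

-- outer `while start_t != finish_t+1:` — runs finish_t+1 times (start_t = 0,1,…,finish_t)
def loopA (r : List Int) : Nat → Int → (List (Int × Int) × List (Int × Int × Int) × List Int) →
    (List (Int × Int) × List (Int × Int × Int) × List Int)
  | 0, _, st => st
  | fuel+1, s, st =>
    let p := pushLoopA r s st.1 st.2.1
    match heapPop p.2 with
    | none => loopA r fuel (s+1) (p.1, p.2, st.2.2)
    | some mh => loopA r fuel (s+1) (p.1, mh.2, st.2.2 ++ [mh.1.2.2])

-- trailing `while heap:` — pops everything left
def drainA : Nat → List (Int × Int × Int) → List Int → List Int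
  | 0, _, ans => ans
  | fuel+1, heap, ans =>
    match heapPop heap with
    | none => ans
    | some mh => drainA fuel mh.2 (ans ++ [mh.1.2.2])

def solution (t : List Int) (r : List Int) : List Int :=
  match PySem.List.max? t (fun x => x) with
  | none => []  -- max(t) raises ValueError on empty t: excluded by Pre_solution
  | some finish =>
    let sl := PySem.List.sorted2 ((PySem.List.enumerate t).map (fun p => (p.2, p.1)))
      (fun p => p.1) (fun p => p.2) true
    let st := loopA r (finish + 1).toNat 0 (sl, [], [])
    drainA st.2.1.length st.2.1 st.2.2

-- ===== PORT B =====
-- B's `t[i]` (indices produced by range(len(t)) are always in range)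
def tv (t : List Int) (i : Int) : Int := PySem.List.pyGetD t i 0

-- B's key lambda `(r[i], t[i], i)`
def key3 (t r : List Int) (i : Int) : Int × Int × Int :=
  (PySem.List.pyGetD r i 0, tv t i, i)

-- hand port of `min(avail, key=lambda i: (r[i], t[i], i))` (first minimum; exact: Python's min
-- keeps the earliest minimal element, which this fold does)
def minKey? (t r : List Int) (xs : List Int) : Option Int :=
  match xs with
  | [] => none
  | x :: rest => some (rest.foldl (fun b i => if lt3 (key3 t r i) (key3 t r b) then i else b) x)

def loopB (t r : List Int) : Nat → List Int → Int → List Int → List Int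
  | 0, _, _, ans => ans
  | fuel+1, unserved, time, ans =>
    if unserved.isEmpty then ans
    else
      let avail := unserved.filter (fun i => decide (tv t i ≤ time))
      let ta :=
        if avail.isEmpty then
          let tm := (PySem.List.min? (unserved.map (fun i => tv t i)) (fun x => x)).getD time
          (tm, unserved.filter (fun i => decide (tv t i ≤ tm)))
        else (time, avail)
      match minKey? t r ta.2 with
      | none => ans  -- unreachable: ta.2 is nonempty
      | some b => loopB t r fuel (unserved.filter (fun i => !(i == b))) (ta.1 + 1) (ans ++ [b])

def solution_alt (t : List Int) (r : List Int) : List Int :=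
  loopB t r t.length (PySem.List.pyRange 0 (PySem.List.len t) 1) 0 []

-- ===== PRECONDITION & SPEC =====
-- Pre_ excludes: empty t (max(t) raises ValueError); r shorter than t (A raises IndexError at
-- r[customer_id]); and negative arrival times, which are outside the task's natural domain (the
-- clock starts at 0) — there A happens to return with the negative-time customers and everyone
-- sorted behind them silently unserved, while B serves every customer.
def Pre_solution (t : List Int) (r : List Int) : Prop :=
  t ≠ [] ∧ (∀ x ∈ t, 0 ≤ x) ∧ t.length ≤ r.length
instance (t : List Int) (r : List Int) : Decidable (Pre_solution t r) := by
  unfold Pre_solution; infer_instance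
def pvWitness_solution : List Int × List Int := ([0, 2, 2, 5], [2, 1, 3, 1])

def Spec_solution (t : List Int) (r : List Int) (out : List Int) : Prop := out = solution_alt t r
instance (t : List Int) (r : List Int) (out : List Int) : Decidable (Spec_solution t r out) := by
  unfold Spec_solution; infer_instance

-- ===== CLAIM (what is proved, stated in full; the proofs are below) =====
def Claim_equal_solution : Prop :=
  ∀ (t : List Int) (r : List Int), Dom_solution t r → Pre_solution t r →
    Spec_solution t r (solution t r)
-- ===== LEMMAS AND PROOFS =====

-- strict lexicographic order on the (value, id) pairs of A's sort_list
def plt (p q : Int × Int) : Prop := p.1 < q.1 ∨ (p.1 = q.1 ∧ p.2 < q.2)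

lemma lt3_irrefl (a : Int × Int × Int) : lt3 a a = false := by simp [lt3]

lemma lt3_trans {a b c : Int × Int × Int} (h1 : lt3 a b = true) (h2 : lt3 b c = true) :
    lt3 a c = true := by
  obtain ⟨a1, a2, a3⟩ := a; obtain ⟨b1, b2, b3⟩ := b; obtain ⟨c1, c2, c3⟩ := c
  simp [lt3] at *; omega

lemma lt3_eq_of_not {a b : Int × Int × Int} (h1 : lt3 a b = false) (h2 : lt3 b a = false) :
    a = b := by
  obtain ⟨a1, a2, a3⟩ := a; obtain ⟨b1, b2, b3⟩ := b
  simp [lt3, Prod.ext_iff] at *; omega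

lemma key3_inj {t r : List Int} {i j : Int} (h : key3 t r i = key3 t r j) : i = j := by
  simp [key3, Prod.ext_iff] at h; exact h.2.2

lemma minFold_spec {α : Type} (f : α → Int × Int × Int) (x : α) (xs : List α) :
    (xs.foldl (fun m y => if lt3 (f y) (f m) then y else m) x) ∈ x :: xs ∧
    ∀ y ∈ x :: xs, lt3 (f y) (f (xs.foldl (fun m y => if lt3 (f y) (f m) then y else m) x)) = false := by
  induction xs generalizing x with
  | nil =>
    refine ⟨by simp, ?_⟩
    intro y hy; simp at hy; subst hy; simp [lt3_irrefl]
  | cons z rest ih =>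
    simp only [List.foldl_cons]
    cases hzx : lt3 (f z) (f x) with
    | true =>
      rw [if_pos rfl]
      obtain ⟨ihmem, ihmin⟩ := ih z
      refine ⟨?_, ?_⟩
      · rcases List.mem_cons.mp ihmem with h | h
        · rw [h]; simp
        · simp [h]
      · intro y hy
        rcases List.mem_cons.mp hy with rfl | hy2
        · cases hxx : lt3 (f y) (f (rest.foldl (fun m y => if lt3 (f y) (f m) then y else m) z)) with
          | false => rfl
          | true =>
            have h2 := lt3_trans hzx hxx
            rw [ihmin z (by simp)] at h2; simp at h2
        · exact ihmin y hy2
    | false =>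
      rw [if_neg (by simp)]
      obtain ⟨ihmem, ihmin⟩ := ih x
      refine ⟨?_, ?_⟩
      · rcases List.mem_cons.mp ihmem with h | h
        · rw [h]; simp
        · simp [h]
      · intro y hy
        rcases List.mem_cons.mp hy with rfl | hy2
        · exact ihmin y (by simp)
        rcases List.mem_cons.mp hy2 with rfl | hy3
        · cases hxz : lt3 (f x) (f y) with
          | false => rw [lt3_eq_of_not hzx hxz]; exact ihmin x (by simp)
          | true =>
            cases hzr : lt3 (f y) (f (rest.foldl (fun m y => if lt3 (f y) (f m) then y else m) x)) with
            | false => rfl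
            | true =>
              have h2 := lt3_trans hxz hzr
              rw [ihmin x (by simp)] at h2; simp at h2
        · exact ihmin y (by simp [hy3])

lemma heapMin?_spec {h : List (Int × Int × Int)} (hne : h ≠ []) :
    ∃ m, heapMin? h = some m ∧ m ∈ h ∧ ∀ y ∈ h, lt3 y m = false := by
  cases h with
  | nil => exact absurd rfl hne
  | cons x xs =>
    obtain ⟨hmem, hmin⟩ := minFold_spec (fun a => a) x xs
    exact ⟨_, rfl, hmem, hmin⟩

lemma minKey?_spec {t r : List Int} {xs : List Int} (hne : xs ≠ []) :
    ∃ b, minKey? t r xs = some b ∧ b ∈ xs ∧ ∀ y ∈ xs, lt3 (key3 t r y) (key3 t r b) = false := by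
  cases xs with
  | nil => exact absurd rfl hne
  | cons x rest =>
    obtain ⟨hmem, hmin⟩ := minFold_spec (key3 t r) x rest
    exact ⟨_, rfl, hmem, hmin⟩

lemma minmatch {t r : List Int} {heap : List (Int × Int × Int)} {avail : List Int}
    {m : Int × Int × Int} {b : Int}
    (hmem : ∀ x, x ∈ heap ↔ ∃ i ∈ avail, x = key3 t r i)
    (hm : m ∈ heap) (hmmin : ∀ y ∈ heap, lt3 y m = false)
    (hb : b ∈ avail) (hbmin : ∀ y ∈ avail, lt3 (key3 t r y) (key3 t r b) = false) :
    m = key3 t r b := by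
  have hbheap : key3 t r b ∈ heap := (hmem _).mpr ⟨b, hb, rfl⟩
  obtain ⟨i0, hi0, rfl⟩ := (hmem m).mp hm
  exact lt3_eq_of_not (hbmin i0 hi0) (hmmin _ hbheap)

lemma pushLoopA_nil (r : List Int) (s : Int) (heap : List (Int × Int × Int)) :
    pushLoopA r s [] heap = ([], heap) := by
  rw [pushLoopA]
  split <;> simp_all

lemma pushLoopA_concat (r : List Int) (s : Int) (sl : List (Int × Int)) (v i : Int)
    (heap : List (Int × Int × Int)) :
    pushLoopA r s (sl ++ [(v, i)]) heap =
      if v = s then pushLoopA r s sl ((PySem.List.pyGetD r i 0, v, i) :: heap)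
      else (sl ++ [(v, i)], heap) := by
  rw [pushLoopA]
  split
  · rename_i hl
    simp at hl
  · rename_i v1 i1 hl
    rw [List.getLast?_concat] at hl
    injection hl with h
    cases h
    rw [List.dropLast_concat]

lemma loopA_emp (r : List Int) : ∀ (fuel : Nat) (s : Int) (ans : List Int),
    loopA r fuel s ([], [], ans) = ([], [], ans) := by
  intro fuel
  induction fuel with
  | zero => intro s ans; simp [loopA]
  | succ n ih =>
    intro s ans
    simp only [loopA, pushLoopA_nil, heapPop, heapMin?, Option.map_none]
    exact ih _ _

lemma pushA_char (r : List Int) (s : Int) :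
    ∀ (asc : List (Int × Int)) (heap : List (Int × Int × Int)),
    (∀ p ∈ asc, s ≤ p.1) → asc.Pairwise plt →
    pushLoopA r s asc.reverse heap =
      ((asc.filter (fun p => decide (s < p.1))).reverse,
       ((asc.filter (fun p => p.1 == s)).map
          (fun p => (PySem.List.pyGetD r p.2 0, p.1, p.2))).reverse ++ heap) := by
  intro asc
  induction asc with
  | nil => intro heap _ _; simp [pushLoopA_nil]
  | cons p rest ih =>
    obtain ⟨v, i⟩ := p
    intro heap hge hpair
    have hrev : ((v, i) :: rest).reverse = rest.reverse ++ [(v, i)] := by simp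
    rw [hrev, pushLoopA_concat]
    by_cases hv : v = s
    · rw [if_pos hv]
      rw [ih ((PySem.List.pyGetD r i 0, v, i) :: heap)
            (fun q hq => hge q (List.mem_cons_of_mem _ hq)) (List.Pairwise.of_cons hpair)]
      subst hv
      simp
    · rw [if_neg hv]
      have hvlt : s < v := lt_of_le_of_ne (hge (v, i) (by simp)) (fun h => hv h.symm)
      have hall : ∀ q ∈ (v, i) :: rest, s < q.1 := by
        intro q hq
        rcases List.mem_cons.mp hq with rfl | hq2
        · exact hvlt
        · rcases List.pairwise_cons.mp hpair with ⟨hhead, -⟩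
          rcases hhead q hq2 with h | ⟨heq, -⟩
          · omega
          · omega
      rw [List.filter_eq_self.mpr (by intro a ha; simpa using hall a ha)]
      rw [List.filter_eq_nil_iff.mpr (by intro a ha; have := hall a ha; simp; omega)]
      simp [hrev]

lemma loopB_jump (t r : List Int) (U : List Int) (s : Int) (ans : List Int) (fuel : Nat)
    (hU : U ≠ []) (hav : U.filter (fun i => decide (tv t i ≤ s)) = []) :
    loopB t r fuel U s ans = loopB t r fuel U (s+1) ans := by
  cases fuel with
  | zero => rfl
  | succ k =>
    have hUe : U.isEmpty = false := by cases U with | nil => exact absurd rfl hU | cons a l => rfl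
    simp only [loopB, hUe, Bool.false_eq_true, if_false]
    rw [hav]
    simp only [List.isEmpty_nil]
    cases hmin : PySem.List.min? (U.map fun i => tv t i) (fun x => x) with
    | none =>
      rw [PySem.List.min?_eq_none_iff, List.map_eq_nil_iff] at hmin
      exact absurd hmin hU
    | some m =>
      simp only [Option.getD_some, if_true]
      have havall : ∀ i ∈ U, ¬ (tv t i ≤ s) := by
        intro i hi hle
        have : i ∈ U.filter (fun i => decide (tv t i ≤ s)) := by
          simp [List.mem_filter, hi, hle]
        rw [hav] at this; simp at this
      by_cases hav2 : U.filter (fun i => decide (tv t i ≤ s + 1)) = []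
      · rw [hav2]
        simp only [List.isEmpty_nil, if_true]
        rfl
      · have hav2e : (U.filter (fun i => decide (tv t i ≤ s + 1))).isEmpty = false := by
          cases h2 : U.filter (fun i => decide (tv t i ≤ s + 1)) with
          | nil => exact absurd h2 hav2
          | cons a l => rfl
        simp only [hav2e, Bool.false_eq_true, if_false]
        have hm1 : s + 1 ≤ m := by
          have hmm := PySem.List.min?_mem hmin
          rw [List.mem_map] at hmm
          obtain ⟨i1, hi1, rfl⟩ := hmm
          have := havall i1 hi1; omega
        have hm2 : m ≤ s + 1 := by
          rcases List.exists_mem_of_ne_nil _ hav2 with ⟨i0, hi0⟩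
          rw [List.mem_filter] at hi0
          have hle := PySem.List.min?_isMin hmin (tv t i0) (List.mem_map_of_mem hi0.1)
          simp at hi0
          omega
        have hms : m = s + 1 := le_antisymm hm2 hm1
        subst hms
        rfl

lemma drain_eq (t r : List Int) :
    ∀ (n : Nat) (U : List Int) (heap : List (Int × Int × Int)) (s : Int) (ans : List Int),
    U.Nodup → heap.Nodup →
    (∀ m, m ∈ heap ↔ ∃ i ∈ U, m = key3 t r i) →
    (∀ i ∈ U, tv t i ≤ s) →
    heap.length = n →
    drainA n heap ans = loopB t r U.length U s ans := by
  intro n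
  induction n with
  | zero =>
    intro U heap s ans hU hh hmem hle hlen
    have hheap : heap = [] := List.length_eq_zero_iff.mp hlen
    subst hheap
    have hUnil : U = [] := by
      cases U with
      | nil => rfl
      | cons a l =>
        have := (hmem (key3 t r a)).mpr ⟨a, by simp, rfl⟩
        simp at this
    subst hUnil
    rfl
  | succ n ih =>
    intro U heap s ans hU hh hmem hle hlen
    have hhne : heap ≠ [] := by intro h; subst h; simp at hlen
    obtain ⟨m, hmq, hmmem, hmmin⟩ := heapMin?_spec hhne
    have hUne : U ≠ [] := by
      intro h; subst h
      have := (hmem m).mp hmmem; simp at this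
    obtain ⟨u, Urest, rfl⟩ : ∃ u Urest, U = u :: Urest := by
      cases U with
      | nil => exact absurd rfl hUne
      | cons u l => exact ⟨u, l, rfl⟩
    have hfil : (u :: Urest).filter (fun i => decide (tv t i ≤ s)) = u :: Urest :=
      List.filter_eq_self.mpr (fun a ha => by simpa using hle a ha)
    obtain ⟨b, hbq, hbmem, hbmin⟩ := minKey?_spec (t := t) (r := r) (xs := u :: Urest) (by simp)
    have hmb : m = key3 t r b := minmatch hmem hmmem hmmin hbmem hbmin
    have hpop : heapPop heap = some (m, heap.erase m) := by simp [heapPop, hmq]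
    rw [show drainA (n+1) heap ans = drainA n (heap.erase m) (ans ++ [m.2.2]) from by
      simp [drainA, hpop]]
    simp only [List.length_cons, loopB]
    rw [if_neg (by simp), hfil]
    simp only [List.isEmpty_cons, Bool.false_eq_true, if_false, hbq]
    have hm22 : m.2.2 = b := by rw [hmb]; rfl
    rw [hm22]
    have hU'len : ((u :: Urest).filter (fun i => !(i == b))).length = Urest.length := by
      have he : (u :: Urest).filter (fun i => !(i == b)) = (u :: Urest).erase b := by
        rw [List.Nodup.erase_eq_filter hU]
        rfl
      rw [he, List.length_erase_of_mem hbmem]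
      simp
    have hres := ih ((u :: Urest).filter (fun i => !(i == b))) (heap.erase m) (s+1) (ans ++ [b])
      (hU.filter _) (hh.erase _)
      (by
        intro x
        rw [List.Nodup.mem_erase_iff hh]
        constructor
        · rintro ⟨hxm, hxheap⟩
          obtain ⟨i, hi, rfl⟩ := (hmem x).mp hxheap
          have hib : i ≠ b := by
            intro h; subst h; exact hxm (by rw [hmb])
          exact ⟨i, by simp [List.mem_filter, hi, hib], rfl⟩
        · rintro ⟨i, hi, rfl⟩
          rw [List.mem_filter] at hi
          obtain ⟨hiU, hib0⟩ := hi
          have hib : i ≠ b := by simpa using hib0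
          exact ⟨by rw [hmb]; exact fun h => hib (key3_inj h), (hmem _).mpr ⟨i, hiU, rfl⟩⟩)
      (by
        intro i hi
        have := hle i (List.mem_of_mem_filter hi); omega)
      (by rw [List.length_erase_of_mem hmmem, hlen]; simp)
    rw [hU'len] at hres
    exact hres

lemma plt_ne {p q : Int × Int} (h : plt p q) : p ≠ q := by
  rintro rfl
  rcases h with h | ⟨-, h⟩ <;> omega

lemma loopA_succ_none (r : List Int) (fuel : Nat) (s : Int) (sl sl' : List (Int × Int))
    (heap heap' : List (Int × Int × Int)) (ans : List Int)
    (hp : pushLoopA r s sl heap = (sl', heap')) (hq : heapPop heap' = none) :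
    loopA r (fuel+1) s (sl, heap, ans) = loopA r fuel (s+1) (sl', heap', ans) := by
  simp only [loopA, hp, hq]

lemma loopA_succ_pop (r : List Int) (fuel : Nat) (s : Int) (sl sl' : List (Int × Int))
    (heap heap' : List (Int × Int × Int)) (m : Int × Int × Int) (h2 : List (Int × Int × Int))
    (ans : List Int)
    (hp : pushLoopA r s sl heap = (sl', heap')) (hq : heapPop heap' = some (m, h2)) :
    loopA r (fuel+1) s (sl, heap, ans) = loopA r fuel (s+1) (sl', h2, ans ++ [m.2.2]) := by
  simp only [loopA, hp, hq]

lemma mainA (t r : List Int) :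
    ∀ (fuel : Nat) (s : Int) (asc : List (Int × Int)) (heap : List (Int × Int × Int))
      (ans : List Int) (U : List Int),
    U.Nodup →
    (∀ v i, (v, i) ∈ asc ↔ (i ∈ U ∧ s ≤ tv t i ∧ v = tv t i)) →
    asc.Pairwise plt →
    heap.Nodup →
    (∀ m, m ∈ heap ↔ ∃ i ∈ U, tv t i < s ∧ m = key3 t r i) →
    (∀ i ∈ U, tv t i < s + (fuel : Int)) →
    drainA (loopA r fuel s (asc.reverse, heap, ans)).2.1.length
      (loopA r fuel s (asc.reverse, heap, ans)).2.1
      (loopA r fuel s (asc.reverse, heap, ans)).2.2 = loopB t r U.length U s ans := by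
  intro fuel
  induction fuel with
  | zero =>
    intro s asc heap ans U hU hasc hpair hh hmem hfin
    refine drain_eq t r heap.length U heap s ans hU hh ?_ ?_ rfl
    · intro m
      constructor
      · intro hm
        obtain ⟨i, hi, -, e⟩ := (hmem m).mp hm
        exact ⟨i, hi, e⟩
      · rintro ⟨i, hi, e⟩
        refine (hmem m).mpr ⟨i, hi, ?_, e⟩
        have := hfin i hi; push_cast at this; omega
    · intro i hi
      have := hfin i hi; push_cast at this; omega
  | succ fuel ih =>
    intro s asc heap ans U hU hasc hpair hh hmem hfin
    have hge : ∀ p ∈ asc, s ≤ p.1 := by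
      intro p hp
      obtain ⟨v, i⟩ := p
      obtain ⟨-, h2, h3⟩ := (hasc v i).mp hp
      simp; omega
    have hpush := pushA_char r s asc heap hge hpair
    have hmem1 : ∀ x, x ∈ ((asc.filter (fun p => p.1 == s)).map
          (fun p => (PySem.List.pyGetD r p.2 0, p.1, p.2))).reverse ++ heap ↔
        ∃ i ∈ U, tv t i ≤ s ∧ x = key3 t r i := by
      intro x
      simp only [List.mem_append, List.mem_reverse, List.mem_map, List.mem_filter]
      constructor
      · rintro (⟨p, ⟨hpA, hps⟩, rfl⟩ | hxh)
        · obtain ⟨v, i⟩ := p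
          obtain ⟨hiU, hsv, hveq⟩ := (hasc v i).mp hpA
          have hvs : v = s := by simpa using hps
          exact ⟨i, hiU, by omega, by simp [key3]; omega⟩
        · obtain ⟨i, hiU, hlt, rfl⟩ := (hmem x).mp hxh
          exact ⟨i, hiU, le_of_lt hlt, rfl⟩
      · rintro ⟨i, hiU, hile, rfl⟩
        rcases lt_or_eq_of_le hile with hlt | heq
        · right; exact (hmem _).mpr ⟨i, hiU, hlt, rfl⟩
        · left
          exact ⟨(tv t i, i), ⟨(hasc _ i).mpr ⟨hiU, by omega, rfl⟩, by simp [heq]⟩,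
            by simp [key3]⟩
    have hnodupA : asc.Nodup := hpair.imp plt_ne
    have hnodup1 : (((asc.filter (fun p => p.1 == s)).map
          (fun p => (PySem.List.pyGetD r p.2 0, p.1, p.2))).reverse ++ heap).Nodup := by
      refine List.nodup_append.mpr ⟨?_, hh, ?_⟩
      · refine List.nodup_reverse.mpr (List.Nodup.map ?_ (hnodupA.filter _))
        intro p q h
        simp only [Prod.ext_iff] at h
        exact Prod.ext h.2.1 h.2.2
      · intro x hx1 y hx2 hxy
        subst hxy
        simp only [List.mem_reverse, List.mem_map, List.mem_filter] at hx1
        obtain ⟨p, ⟨hpA, hps⟩, rfl⟩ := hx1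
        obtain ⟨i, hiU, hlt, heq⟩ := (hmem _).mp hx2
        have h1 : p.1 = tv t i := by
          simpa [key3, Prod.ext_iff] using congrArg (fun z => z.2.1) heq
        have hps' : p.1 = s := by simpa using hps
        omega
    by_cases hav : U.filter (fun i => decide (tv t i ≤ s)) = []
    · -- idle tick: nothing arrives, heap stays empty
      have hHPnil : ((asc.filter (fun p => p.1 == s)).map
          (fun p => (PySem.List.pyGetD r p.2 0, p.1, p.2))).reverse ++ heap = [] := by
        rw [List.eq_nil_iff_forall_not_mem]
        intro x hx
        obtain ⟨i, hiU, hile, -⟩ := (hmem1 x).mp hx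
        have : i ∈ U.filter (fun i => decide (tv t i ≤ s)) := by
          simp [List.mem_filter, hiU, hile]
        rw [hav] at this; simp at this
      rw [hHPnil] at hpush
      rw [loopA_succ_none r fuel s asc.reverse (asc.filter (fun p => decide (s < p.1))).reverse
        heap [] ans hpush rfl]
      by_cases hUnil : U = []
      · subst hUnil
        have hascnil : asc = [] := by
          rw [List.eq_nil_iff_forall_not_mem]
          intro p hp
          obtain ⟨v, i⟩ := p
          obtain ⟨h1, -, -⟩ := (hasc v i).mp hp
          simp at h1
        subst hascnil
        rw [show (([] : List (Int × Int)).filter (fun p => decide (s < p.1))).reverse = [] from rfl]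
        rw [loopA_emp]
        rfl
      · have hres := ih (s+1) (asc.filter (fun p => decide (s < p.1))) [] ans U hU
          (by
            intro v i
            simp only [List.mem_filter]
            constructor
            · rintro ⟨hpA, hlt⟩
              obtain ⟨hiU, hsv, hveq⟩ := (hasc v i).mp hpA
              simp at hlt
              exact ⟨hiU, by omega, hveq⟩
            · rintro ⟨hiU, hsv, hveq⟩
              refine ⟨(hasc v i).mpr ⟨hiU, by omega, hveq⟩, by simp; omega⟩)
          (hpair.filter _)
          List.nodup_nil
          (by
            intro m
            simp only [List.not_mem_nil, false_iff]
            rintro ⟨i, hiU, hlt, -⟩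
            have : i ∈ U.filter (fun i => decide (tv t i ≤ s)) := by
              simp [List.mem_filter, hiU]; omega
            rw [hav] at this; simp at this)
          (by
            intro i hi
            have := hfin i hi; push_cast at this ⊢; omega)
        rw [hres]
        exact (loopB_jump t r U s ans U.length hUnil hav).symm
    · -- serve tick
      have hHPne : ((asc.filter (fun p => p.1 == s)).map
          (fun p => (PySem.List.pyGetD r p.2 0, p.1, p.2))).reverse ++ heap ≠ [] := by
        rcases List.exists_mem_of_ne_nil _ hav with ⟨i0, hi0⟩
        rw [List.mem_filter] at hi0
        intro h
        have hmm : key3 t r i0 ∈ ((asc.filter (fun p => p.1 == s)).map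
            (fun p => (PySem.List.pyGetD r p.2 0, p.1, p.2))).reverse ++ heap :=
          (hmem1 _).mpr ⟨i0, hi0.1, by simpa using hi0.2, rfl⟩
        rw [h] at hmm; simp at hmm
      obtain ⟨m, hmq, hmmem, hmmin⟩ := heapMin?_spec hHPne
      have hpop : heapPop (((asc.filter (fun p => p.1 == s)).map
          (fun p => (PySem.List.pyGetD r p.2 0, p.1, p.2))).reverse ++ heap) =
          some (m, (((asc.filter (fun p => p.1 == s)).map
          (fun p => (PySem.List.pyGetD r p.2 0, p.1, p.2))).reverse ++ heap).erase m) := by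
        simp [heapPop, hmq]
      rw [loopA_succ_pop r fuel s asc.reverse (asc.filter (fun p => decide (s < p.1))).reverse
        _ _ m _ ans hpush hpop]
      obtain ⟨b, hbq, hbmem0, hbmin⟩ := minKey?_spec (t := t) (r := r) hav
      have hbU : b ∈ U := List.mem_of_mem_filter hbmem0
      have hble : tv t b ≤ s := by
        have := (List.mem_filter.mp hbmem0).2; simpa using this
      have hmb : m = key3 t r b := by
        refine minmatch ?_ hmmem hmmin hbmem0 hbmin
        intro x
        rw [hmem1 x]
        constructor
        · rintro ⟨i, h1, h2, h3⟩
          exact ⟨i, by simp [List.mem_filter, h1, h2], h3⟩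
        · rintro ⟨i, hi, h3⟩
          rw [List.mem_filter] at hi
          exact ⟨i, hi.1, by simpa using hi.2, h3⟩
      have hm22 : m.2.2 = b := by rw [hmb]; rfl
      obtain ⟨u, Urest, hUeq⟩ : ∃ u Urest, U = u :: Urest := by
        cases U with
        | nil => simp at hav
        | cons u l => exact ⟨u, l, rfl⟩
      subst hUeq
      have hve : ((u :: Urest).filter (fun i => decide (tv t i ≤ s))).isEmpty = false := by
        cases h2 : (u :: Urest).filter (fun i => decide (tv t i ≤ s)) with
        | nil => exact absurd h2 hav
        | cons a l => rfl
      simp only [List.length_cons, loopB]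
      rw [if_neg (by simp)]
      simp only [hve, Bool.false_eq_true, if_false, hbq]
      have hU'len : ((u :: Urest).filter (fun i => !(i == b))).length = Urest.length := by
        have he : (u :: Urest).filter (fun i => !(i == b)) = (u :: Urest).erase b := by
          rw [List.Nodup.erase_eq_filter hU]
          rfl
        rw [he, List.length_erase_of_mem hbU]
        simp
      have hres := ih (s+1) (asc.filter (fun p => decide (s < p.1)))
        ((((asc.filter (fun p => p.1 == s)).map
          (fun p => (PySem.List.pyGetD r p.2 0, p.1, p.2))).reverse ++ heap).erase m)
        (ans ++ [b]) ((u :: Urest).filter (fun i => !(i == b)))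
        (hU.filter _)
        (by
          intro v i
          simp only [List.mem_filter]
          constructor
          · rintro ⟨hpA, hlt⟩
            obtain ⟨hiU, hsv, hveq⟩ := (hasc v i).mp hpA
            simp at hlt
            have hib : i ≠ b := by
              intro h; subst h; omega
            exact ⟨⟨hiU, by simp [hib]⟩, by omega, hveq⟩
          · rintro ⟨⟨hiU1, -⟩, hsv, hveq⟩
            refine ⟨(hasc v i).mpr ⟨hiU1, by omega, hveq⟩, by simp; omega⟩)
        (hpair.filter _)
        (hnodup1.erase _)
        (by
          intro x
          rw [List.Nodup.mem_erase_iff hnodup1]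
          constructor
          · rintro ⟨hxm, hx⟩
            obtain ⟨i, hiU, hile, rfl⟩ := (hmem1 x).mp hx
            have hib : i ≠ b := by
              intro h; subst h; exact hxm hmb.symm
            exact ⟨i, List.mem_filter.mpr ⟨hiU, by simp [hib]⟩, by omega, rfl⟩
          · rintro ⟨i, hi, hilt, rfl⟩
            rw [List.mem_filter] at hi
            obtain ⟨hiU, hib0⟩ := hi
            have hib : i ≠ b := by simpa using hib0
            exact ⟨fun h => hib (key3_inj (h.trans hmb)),
              (hmem1 _).mpr ⟨i, hiU, by omega, rfl⟩⟩)
        (by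
          intro i hi
          have := hfin i (List.mem_of_mem_filter hi)
          push_cast at this ⊢; omega)
      rw [hU'len] at hres
      rw [hm22]
      exact hres

lemma sorted2_lex (xs : List (Int × Int)) :
    PySem.List.sorted2 xs (fun p => p.1) (fun p => p.2) true =
    PySem.List.sorted xs (fun p => (toLex p : Lex (Int × Int))) true := by
  rw [PySem.List.sorted_rev_eq_foldl_insertBy]
  simp only [PySem.List.sorted2]
  congr 1
  funext acc x
  congr 1
  funext a b
  obtain ⟨a1, a2⟩ := a
  obtain ⟨b1, b2⟩ := b
  rw [Bool.eq_iff_iff]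
  simp [Prod.Lex.lt_iff]
  omega

-- ===== VERDICT (by name: the statement is the Claim_ definition above) =====
theorem solution_spec : Claim_equal_solution := by
  unfold Claim_equal_solution
  intro t r _ hpre
  obtain ⟨hne, hnn, hlen⟩ := hpre
  unfold Spec_solution
  cases hmax : PySem.List.max? t (fun x => x) with
  | none =>
    rw [PySem.List.max?_eq_none_iff] at hmax
    exact absurd hmax hne
  | some finish =>
    have hfinmem : finish ∈ t := PySem.List.max?_mem hmax
    have hfin0 : 0 ≤ finish := hnn finish hfinmem
    have hmaxall : ∀ y ∈ t, y ≤ finish := PySem.List.max?_isMax hmax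
    have hxsmem : ∀ v i : Int, (v, i) ∈ (PySem.List.enumerate t).map (fun p => (p.2, p.1)) ↔
        ∃ (k : Nat) (_ : k < t.length), i = (k : Int) ∧ v = t[k] := by
      intro v i
      simp only [List.mem_map]
      constructor
      · rintro ⟨p, hp, he⟩
        rw [PySem.List.mem_enumerate_iff] at hp
        obtain ⟨k, hk, rfl⟩ := hp
        rw [Prod.mk.injEq] at he
        exact ⟨k, hk, by omega, he.1.symm⟩
      · rintro ⟨k, hk, rfl, rfl⟩
        refine ⟨((0:Int) + (k:Int), t[k]), ?_, by simp⟩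
        rw [PySem.List.mem_enumerate_iff]
        exact ⟨k, hk, rfl⟩
    have htv : ∀ (k : Nat) (hk : k < t.length), tv t (k : Int) = t[k] := by
      intro k hk
      have h1 : tv t (k : Int) = t.getD k 0 := by simp [tv]
      rw [h1]
      exact List.getD_eq_getElem t 0 hk
    have hU0mem : ∀ i : Int, i ∈ PySem.List.pyRange 0 (PySem.List.len t) 1 ↔
        0 ≤ i ∧ i < t.length := by
      intro i
      rw [PySem.List.mem_pyRange_one]
      simp [PySem.List.len_eq]
    have htvmem : ∀ i : Int, 0 ≤ i → i < t.length → tv t i ∈ t := by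
      intro i h0 h1
      have : tv t i = t[i.toNat] := by
        have := htv i.toNat (by omega)
        rwa [Int.toNat_of_nonneg h0] at this
      rw [this]
      exact List.getElem_mem _
    have hxsnd : ((PySem.List.enumerate t).map (fun p => (p.2, p.1))).Nodup := by
      refine List.Nodup.map ?_ ?_
      · intro p q h
        simp only [Prod.ext_iff] at h
        exact Prod.ext h.2 h.1
      · exact (PySem.List.pairwise_lt_enumerate t 0).imp
          (fun {a b} h => fun he => by rw [he] at h; exact lt_irrefl _ h)
    have hascnd : (PySem.List.sorted ((PySem.List.enumerate t).map (fun p => (p.2, p.1)))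
        (fun p => (toLex p : Lex (Int × Int))) false).Nodup :=
      ((PySem.List.sorted_perm _ _ false).nodup_iff).mpr hxsnd
    have hascpw : (PySem.List.sorted ((PySem.List.enumerate t).map (fun p => (p.2, p.1)))
        (fun p => (toLex p : Lex (Int × Int))) false).Pairwise
        (fun p q : Int × Int => (toLex p : Lex (Int × Int)) < toLex q) := by
      have h1 := PySem.List.sorted_pairwise ((PySem.List.enumerate t).map (fun p => (p.2, p.1)))
        (fun p => (toLex p : Lex (Int × Int)))
      exact (h1.and hascnd).imp
        (fun {a b} h => lt_of_le_of_ne h.1 (fun he => h.2 (toLex.injective he)))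
    have hsl : PySem.List.sorted2 ((PySem.List.enumerate t).map (fun p => (p.2, p.1)))
        (fun p => p.1) (fun p => p.2) true =
        (PySem.List.sorted ((PySem.List.enumerate t).map (fun p => (p.2, p.1)))
          (fun p => (toLex p : Lex (Int × Int))) false).reverse := by
      rw [sorted2_lex]
      refine PySem.List.sorted_rev_eq_of_perm_of_pairwise_gt _ _ _
        ((List.reverse_perm _).trans (PySem.List.sorted_perm _ _ false)) ?_
      exact List.pairwise_reverse.mpr hascpw
    have hmain := mainA t r (finish + 1).toNat 0
      (PySem.List.sorted ((PySem.List.enumerate t).map (fun p => (p.2, p.1)))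
        (fun p => (toLex p : Lex (Int × Int))) false) [] []
      (PySem.List.pyRange 0 (PySem.List.len t) 1)
      (PySem.List.nodup_pyRange_one 0 (PySem.List.len t))
      (by
        intro v i
        rw [PySem.List.mem_sorted, hxsmem v i]
        constructor
        · rintro ⟨k, hk, rfl, rfl⟩
          have hte := htv k hk
          refine ⟨(hU0mem _).mpr ⟨by omega, by omega⟩, ?_, ?_⟩
          · rw [hte]; exact hnn _ (List.getElem_mem _)
          · rw [hte]
        · rintro ⟨hiU, h0, rfl⟩
          obtain ⟨hi0, hilen⟩ := (hU0mem i).mp hiU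
          refine ⟨i.toNat, by omega, by omega, ?_⟩
          have := htv i.toNat (by omega)
          rw [Int.toNat_of_nonneg hi0] at this
          rw [this]
        )
      (hascpw.imp (fun {a b} h => by rw [Prod.Lex.lt_iff] at h; simpa [plt] using h))
      List.nodup_nil
      (by
        intro m
        simp only [List.not_mem_nil, false_iff]
        rintro ⟨i, hiU, hlt, -⟩
        obtain ⟨hi0, hilen⟩ := (hU0mem i).mp hiU
        have := hnn _ (htvmem i hi0 hilen)
        omega)
      (by
        intro i hiU
        obtain ⟨hi0, hilen⟩ := (hU0mem i).mp hiU
        have h1 := hmaxall _ (htvmem i hi0 hilen)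
        rw [Int.toNat_of_nonneg (by omega : (0:Int) ≤ finish + 1)]
        omega)
    simp only [solution, hmax]
    rw [hsl, hmain]
    have hlen0 : (PySem.List.pyRange 0 (PySem.List.len t) 1).length = t.length := by
      rw [PySem.List.length_pyRange_one]
      simp [PySem.List.len_eq]
    rw [hlen0]
    rfl
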